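-- pv_equiv track=rewrite | github.com/Zion-Holdings/zion.app | workflow_recovery_system.py | fix_missing_structure
-- ===== SOURCE A (Python) =====
-- def fix_missing_structure(content):
--     """Fix files missing runs-on and steps sections"""
--     lines = content.split('\n')
--     fixed_lines = []
--     i = 0
--
--     while i < len(lines):
--         line = lines[i]
--         stripped = line.strip()
--
--         # Look for job definitions
--         if stripped.startswith('- ') and not stripped.startswith('- name:'):
--             fixed_lines.append(line)
--             i += 1
--
--             # Add missing runs-on and steps
--             fixed_lines.append('    runs-on: ubuntu-latest')
--             fixed_lines.append('    steps:')
--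
--             # Process all properties until we hit another job or section
--             while i < len(lines):
--                 next_line = lines[i]
--                 next_stripped = next_line.strip()
--
--                 # Stop if we hit another job or section
--                 if (next_stripped.startswith('- ') or
--                     next_stripped.startswith('jobs:') or
--                     next_stripped.startswith('on:') or
--                     next_stripped.startswith('permissions:') or
--                     next_stripped.startswith('concurrency:')):
--                     break
--
--                 # Fix step properties - add proper indentation
--                 if (next_stripped.startswith('uses:') or
--                     next_stripped.startswith('run:') or
--                     next_stripped.startswith('with:') or
--                     next_stripped.startswith('id:') or
--                     next_stripped.startswith('env:') or
--                     next_stripped.startswith('working-directory:') or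
--                     next_stripped.startswith('shell:') or
--                     next_stripped.startswith('timeout-minutes:') or
--                     next_stripped.startswith('continue-on-error:')):
--
--                     # Ensure proper indentation (8 spaces for step properties)
--                     if not next_line.startswith('        '):
--                         next_line = '        ' + next_stripped
--
--                 fixed_lines.append(next_line)
--                 i += 1
--         else:
--             fixed_lines.append(line)
--             i += 1
--
--     return '\n'.join(fixed_lines)
-- ===== SOURCE B (Python) =====
-- STEP_PROPS = ('uses:', 'run:', 'with:', 'id:', 'env:', 'working-directory:',
--               'shell:', 'timeout-minutes:', 'continue-on-error:')
-- BOUNDARIES = ('- ', 'jobs:', 'on:', 'permissions:', 'concurrency:')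
--
--
-- def fix_missing_structure(content):
--     """Single pass with an in_job state flag instead of a nested while loop."""
--     out = []
--     in_job = False
--     for line in content.split('\n'):
--         stripped = line.strip()
--         if in_job:
--             if any(stripped.startswith(b) for b in BOUNDARIES):
--                 in_job = False  # boundary: fall through to normal handling
--             else:
--                 if any(stripped.startswith(p) for p in STEP_PROPS) and not line.startswith('        '):
--                     line = '        ' + stripped
--                 out.append(line)
--                 continue
--         if stripped.startswith('- ') and not stripped.startswith('- name:'):
--             out.append(line)
--             out.append('    runs-on: ubuntu-latest')
--             out.append('    steps:')
--             in_job = True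
--         else:
--             out.append(line)
--     return '\n'.join(out)
-- ===== Notes on version B (the rewrite author's own statement) =====
-- stated objective: alternative
-- what changed: Replaces A's nested while loops (inner loop consuming job-body lines with manual index management) by a single linear pass over the lines that carries an in_job boolean state flag; boundary lines reset the flag and fall through to normal handling.
import Mathlib
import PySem

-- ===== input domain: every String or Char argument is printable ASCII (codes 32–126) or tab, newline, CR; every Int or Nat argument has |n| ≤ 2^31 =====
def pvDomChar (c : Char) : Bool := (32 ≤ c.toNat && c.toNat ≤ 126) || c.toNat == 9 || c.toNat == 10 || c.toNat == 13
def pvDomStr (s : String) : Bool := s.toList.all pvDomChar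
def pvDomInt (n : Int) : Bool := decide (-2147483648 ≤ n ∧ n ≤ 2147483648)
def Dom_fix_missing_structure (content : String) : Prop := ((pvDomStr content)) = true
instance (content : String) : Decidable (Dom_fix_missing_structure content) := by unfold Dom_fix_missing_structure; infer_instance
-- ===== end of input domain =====

-- B replaces A's nested while loops by one pass with an in_job state flag (objective: alternative decomposition, same cost).

-- ===== PORT A =====
-- A's inner-loop boundary test, written out as A writes it (an or-chain)
def pvBoundaryA (st : String) : Bool :=
  PySem.Str.startswith st "- " ||
  PySem.Str.startswith st "jobs:" ||
  PySem.Str.startswith st "on:" ||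
  PySem.Str.startswith st "permissions:" ||
  PySem.Str.startswith st "concurrency:"

-- A's step-property test, written out as A writes it (an or-chain)
def pvStepPropA (st : String) : Bool :=
  PySem.Str.startswith st "uses:" ||
  PySem.Str.startswith st "run:" ||
  PySem.Str.startswith st "with:" ||
  PySem.Str.startswith st "id:" ||
  PySem.Str.startswith st "env:" ||
  PySem.Str.startswith st "working-directory:" ||
  PySem.Str.startswith st "shell:" ||
  PySem.Str.startswith st "timeout-minutes:" ||
  PySem.Str.startswith st "continue-on-error:"

-- A's inner while loop: consumes job-body lines until a boundary; returns (emitted lines, remaining lines)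
def pvInnerA : List String → List String × List String
  | [] => ([], [])
  | l :: ls =>
    let st := PySem.Str.strip l
    if pvBoundaryA st then ([], l :: ls)
    else
      let l' := if pvStepPropA st && !(PySem.Str.startswith l "        ") then
                  "        " ++ st else l
      let p := pvInnerA ls
      (l' :: p.1, p.2)

theorem pvInnerA_rest_len (ls : List String) : (pvInnerA ls).2.length ≤ ls.length := by
  induction ls with
  | nil => simp [pvInnerA]
  | cons l ls ih =>
    simp only [pvInnerA]
    split
    · simp
    · simpa using Nat.le_succ_of_le ih

-- A's outer while loop
def pvOuterA : List String → List String
  | [] => []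
  | l :: ls =>
    let st := PySem.Str.strip l
    if PySem.Str.startswith st "- " && !(PySem.Str.startswith st "- name:") then
      let p := pvInnerA ls
      l :: "    runs-on: ubuntu-latest" :: "    steps:" :: (p.1 ++ pvOuterA p.2)
    else
      l :: pvOuterA ls
termination_by ls => ls.length
decreasing_by
  · exact Nat.lt_succ_of_le (pvInnerA_rest_len ls)
  · simp

def fix_missing_structure (content : String) : String :=
  PySem.Str.join "\n" (pvOuterA ((PySem.Str.split? content "\n").getD []))  -- split? is some: sep ≠ ""

-- ===== PORT B =====
def pvBoundaries : List String := ["- ", "jobs:", "on:", "permissions:", "concurrency:"]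

def pvStepProps : List String :=
  ["uses:", "run:", "with:", "id:", "env:", "working-directory:",
   "shell:", "timeout-minutes:", "continue-on-error:"]

-- B's single pass with an in_job state flag
def pvGoB : Bool → List String → List String
  | _, [] => []
  | inJob, l :: ls =>
    let st := PySem.Str.strip l
    if inJob && !(pvBoundaries.any fun b => PySem.Str.startswith st b) then
      let l' := if (pvStepProps.any fun p => PySem.Str.startswith st p) &&
                   !(PySem.Str.startswith l "        ") then
                  "        " ++ st else l
      l' :: pvGoB true ls
    else if PySem.Str.startswith st "- " && !(PySem.Str.startswith st "- name:") then
      l :: "    runs-on: ubuntu-latest" :: "    steps:" :: pvGoB true ls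
    else
      l :: pvGoB false ls

def fix_missing_structure_alt (content : String) : String :=
  PySem.Str.join "\n" (pvGoB false ((PySem.Str.split? content "\n").getD []))  -- split? is some: sep ≠ ""

-- ===== PRECONDITION & SPEC =====
def Spec_fix_missing_structure (content : String) (out : String) : Prop := out = fix_missing_structure_alt content
instance (content : String) (out : String) : Decidable (Spec_fix_missing_structure content out) := by unfold Spec_fix_missing_structure; infer_instance

-- ===== CLAIM (what is proved, stated in full; the proofs are below) =====
def Claim_equal_fix_missing_structure : Prop := ∀ (content : String), Dom_fix_missing_structure content → Spec_fix_missing_structure content (fix_missing_structure content)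

-- ===== LEMMAS AND PROOFS =====

theorem pvBoundary_eq (st : String) :
    (pvBoundaries.any fun b => PySem.Str.startswith st b) = pvBoundaryA st := by
  simp [pvBoundaries, pvBoundaryA, Bool.or_assoc]

theorem pvStepProp_eq (st : String) :
    (pvStepProps.any fun p => PySem.Str.startswith st p) = pvStepPropA st := by
  simp [pvStepProps, pvStepPropA, Bool.or_assoc]

set_option maxHeartbeats 1000000 in
theorem pvMain : ∀ n (ls : List String), ls.length ≤ n →
    pvOuterA ls = pvGoB false ls ∧
    (pvInnerA ls).1 ++ pvOuterA (pvInnerA ls).2 = pvGoB true ls := by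
  intro n
  induction n with
  | zero =>
    intro ls h
    have : ls = [] := List.eq_nil_of_length_eq_zero (Nat.le_zero.mp h)
    subst this
    simp [pvOuterA, pvGoB, pvInnerA]
  | succ n ih =>
    intro ls h
    cases ls with
    | nil => simp [pvOuterA, pvGoB, pvInnerA]
    | cons l ls =>
      have hls : ls.length ≤ n := Nat.le_of_succ_le_succ h
      have IH1 := (ih ls hls).1
      have IH2 := (ih ls hls).2
      constructor
      · -- outer = goB false
        rw [pvOuterA.eq_def, pvGoB]
        simp [IH1, IH2]
      · -- inner-then-outer = goB true
        rw [pvGoB, pvInnerA]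
        simp only [pvBoundary_eq, pvStepProp_eq]
        by_cases hb : pvBoundaryA (PySem.Str.strip l) = true
        · -- boundary: A's inner loop stops, the line is re-handled by the outer loop
          rw [pvOuterA.eq_def]
          simp [hb, IH1, IH2]
        · -- not a boundary: both emit the (possibly re-indented) line and stay in the job
          simp [hb, IH2]

-- ===== VERDICT (by name: the statement is the Claim_ definition above) =====
theorem fix_missing_structure_spec : Claim_equal_fix_missing_structure := by
  intro content _
  unfold Spec_fix_missing_structure fix_missing_structure fix_missing_structure_alt
  rw [(pvMain ((PySem.Str.split? content "\n").getD []).length _ le_rfl).1]
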